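-- pv_equiv track=rewrite | github.com/multimodal-interpretability/FIND | src/make_functions/make_strings/string_functions.py | replace_vowels_with_ind_of_count
-- ===== SOURCE A (Python) =====
-- def replace_vowels_with_ind_of_count(string):
--     vowels = 'aeiouAEIOU'
--     replaced_string = ""
--     count = 0
--     for char in string:
--         if char in vowels:
--             count+=1
--     replacement_char = string[count-1]
--     for char in string:
--         if char in vowels:
--             replaced_string += replacement_char
--         else:
--             replaced_string += char
--     return replaced_string
-- ===== SOURCE B (Python) =====
-- def replace_vowels_with_ind_of_count(string):
--     vowels = 'aeiouAEIOU'
--     # single pass: split the string into the maximal vowel-free segments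
--     parts = []
--     buf = []
--     for ch in string:
--         if ch in vowels:
--             parts.append(''.join(buf))
--             buf = []
--         else:
--             buf.append(ch)
--     parts.append(''.join(buf))
--     count = len(parts) - 1          # one separator (= vowel) between consecutive segments
--     replacement_char = string[count - 1]
--     return replacement_char.join(parts)
-- ===== Notes on version B (the rewrite author's own statement) =====
-- stated objective: alternative
-- what changed: B makes one pass that splits the string into maximal vowel-free segments, derives the vowel count as len(parts)-1 from that segment structure, and produces the result by joining the segments with the replacement character, instead of A's two membership-test scans with char-by-char string concatenation; string[count-1] (and its IndexError on the empty string) is kept.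
import Mathlib
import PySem

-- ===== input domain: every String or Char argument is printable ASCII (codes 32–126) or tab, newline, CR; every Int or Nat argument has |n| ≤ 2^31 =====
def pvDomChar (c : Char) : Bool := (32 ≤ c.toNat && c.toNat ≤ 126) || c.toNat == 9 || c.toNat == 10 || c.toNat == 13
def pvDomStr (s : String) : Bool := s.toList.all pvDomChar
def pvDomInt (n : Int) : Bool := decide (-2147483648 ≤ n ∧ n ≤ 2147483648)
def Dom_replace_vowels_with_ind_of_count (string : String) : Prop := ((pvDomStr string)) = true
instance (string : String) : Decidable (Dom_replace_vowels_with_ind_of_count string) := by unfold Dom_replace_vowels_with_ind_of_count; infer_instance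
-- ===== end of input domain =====

-- B replaces A's two membership-scan loops by a single pass that splits the string into
-- maximal vowel-free segments, takes count = len(parts)-1, and joins the segments with the
-- replacement character (alternative decomposition, not claimed faster).


-- ===== PORT A =====
def pvVowels : List Char := "aeiouAEIOU".toList

def replace_vowels_with_ind_of_count (string : String) : String :=
  let count : Int :=
    string.toList.foldl (fun c ch => if ch ∈ pvVowels then c + 1 else c) 0
  -- string[count-1]: Python raises IndexError on the empty string; Pre_ excludes that
  let replacement_char : Char := (PySem.Str.pyGet? string (count - 1)).getD ' '
  string.toList.foldl
    (fun acc ch => if ch ∈ pvVowels then acc.push replacement_char else acc.push ch) ""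

-- ===== PORT B =====
-- rep.join(parts) for a one-char separator: exact for Python str.join on any list of strings
def pvJoin (sep : Char) : List (List Char) → List Char
  | [] => []
  | [b] => b
  | b :: rest => b ++ sep :: pvJoin sep rest

def replace_vowels_with_ind_of_count_alt (string : String) : String :=
  -- single pass: split into maximal vowel-free segments (parts, with buf the open segment)
  let st := string.toList.foldl
    (fun (st : List (List Char) × List Char) ch =>
      if ch ∈ pvVowels then (st.1 ++ [st.2], ([] : List Char)) else (st.1, st.2 ++ [ch]))
    ([], [])
  let parts : List (List Char) := st.1 ++ [st.2]
  let count : Int := (parts.length : Int) - 1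
  -- string[count-1]: raises on the empty string exactly as in A; excluded by Pre_
  let rep : Char := (PySem.Str.pyGet? string (count - 1)).getD ' '
  String.ofList (pvJoin rep parts)

-- ===== PRECONDITION & SPEC =====
-- Pre_ excludes only the empty string, on which Python A raises IndexError at string[count-1].
def Pre_replace_vowels_with_ind_of_count (string : String) : Prop := string ≠ ""
instance (string : String) : Decidable (Pre_replace_vowels_with_ind_of_count string) := by unfold Pre_replace_vowels_with_ind_of_count; infer_instance
def pvWitness_replace_vowels_with_ind_of_count : String := "boat"
def Spec_replace_vowels_with_ind_of_count (string : String) (out : String) : Prop := out = replace_vowels_with_ind_of_count_alt string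
instance (string : String) (out : String) : Decidable (Spec_replace_vowels_with_ind_of_count string out) := by unfold Spec_replace_vowels_with_ind_of_count; infer_instance

-- ===== CLAIM =====
def Claim_equal_replace_vowels_with_ind_of_count : Prop := ∀ (string : String), Dom_replace_vowels_with_ind_of_count string → Pre_replace_vowels_with_ind_of_count string → Spec_replace_vowels_with_ind_of_count string (replace_vowels_with_ind_of_count string)

-- ===== LEMMAS AND PROOFS =====

-- A's counting fold equals the vowel-filter length
theorem pv_count_eq (l : List Char) (c : Int) :
    l.foldl (fun c ch => if ch ∈ pvVowels then c + 1 else c) c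
      = c + ((l.filter (fun ch => ch ∈ pvVowels)).length : Int) := by
  induction l generalizing c with
  | nil => simp
  | cons a t ih => by_cases h : a ∈ pvVowels <;> simp [List.foldl, h, ih] <;> ring

-- A's build loop, read back as a list of chars: map over the input
theorem pv_fold_A (l : List Char) (rep : Char) (s : String) :
    (l.foldl (fun acc ch => if ch ∈ pvVowels then acc.push rep else acc.push ch) s).toList
      = s.toList ++ l.map (fun ch => if ch ∈ pvVowels then rep else ch) := by
  induction l generalizing s with
  | nil => simp
  | cons a t ih =>
    by_cases h : a ∈ pvVowels <;> simp [List.foldl, h, ih, String.toList_push]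

-- unfolding pvJoin on a list with at least two segments
theorem pvJoin_cons_cons (sep : Char) (b c : List Char) (rest : List (List Char)) :
    pvJoin sep (b :: c :: rest) = b ++ sep :: pvJoin sep (c :: rest) := rfl

-- appending to the last segment appends to the join
theorem pv_join_snoc_app (sep : Char) (b x : List Char) (parts : List (List Char)) :
    pvJoin sep (parts ++ [b ++ x]) = pvJoin sep (parts ++ [b]) ++ x := by
  induction parts with
  | nil => simp [pvJoin]
  | cons p ps ih =>
    cases ps with
    | nil => simp [pvJoin_cons_cons, pvJoin]
    | cons q qs =>
      simp only [List.cons_append]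
      simp only [List.cons_append] at ih
      rw [pvJoin_cons_cons, pvJoin_cons_cons, ih]
      simp

-- closing a segment and opening an empty one appends the separator to the join
theorem pv_join_snoc_nil (sep : Char) (xs : List (List Char)) (h : xs ≠ []) :
    pvJoin sep (xs ++ [[]]) = pvJoin sep xs ++ [sep] := by
  induction xs with
  | nil => exact absurd rfl h
  | cons p ps ih =>
    cases ps with
    | nil => simp [pvJoin]
    | cons q qs =>
      simp only [List.cons_append]
      have ih2 := ih (by simp)
      simp only [List.cons_append] at ih2
      rw [pvJoin_cons_cons, pvJoin_cons_cons, ih2]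
      simp

-- the join of B's segmentation fold equals the direct vowel-replacement map
theorem pv_join_fold (rep : Char) (l : List Char) (parts : List (List Char)) (buf : List Char) :
    pvJoin rep
      ((l.foldl (fun (st : List (List Char) × List Char) ch =>
          if ch ∈ pvVowels then (st.1 ++ [st.2], ([] : List Char)) else (st.1, st.2 ++ [ch]))
        (parts, buf)).1
        ++ [(l.foldl (fun (st : List (List Char) × List Char) ch =>
          if ch ∈ pvVowels then (st.1 ++ [st.2], ([] : List Char)) else (st.1, st.2 ++ [ch]))
        (parts, buf)).2])
      = pvJoin rep (parts ++ [buf]) ++ l.map (fun ch => if ch ∈ pvVowels then rep else ch) := by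
  induction l generalizing parts buf with
  | nil => simp
  | cons a t ih =>
    by_cases h : a ∈ pvVowels
    · simp only [List.foldl, h, if_pos]
      rw [ih]
      rw [show parts ++ [buf] ++ [([] : List Char)] = (parts ++ [buf]) ++ [[]] from rfl] at *
      rw [pv_join_snoc_nil rep (parts ++ [buf]) (by simp)]
      simp [h]
    · simp only [List.foldl, h, if_neg, not_false_iff]
      rw [ih, pv_join_snoc_app]
      simp [h]

-- the number of closed segments equals the number of vowels seen
theorem pv_parts_len (l : List Char) (parts : List (List Char)) (buf : List Char) :
    ((l.foldl (fun (st : List (List Char) × List Char) ch =>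
        if ch ∈ pvVowels then (st.1 ++ [st.2], ([] : List Char)) else (st.1, st.2 ++ [ch]))
      (parts, buf)).1).length
      = parts.length + (l.filter (fun ch => ch ∈ pvVowels)).length := by
  induction l generalizing parts buf with
  | nil => simp
  | cons a t ih =>
    by_cases h : a ∈ pvVowels <;> simp [List.foldl, h, ih] <;> omega

-- ===== VERDICT =====
theorem replace_vowels_with_ind_of_count_spec : Claim_equal_replace_vowels_with_ind_of_count := by
  intro s _ _
  show _ = _
  simp only [replace_vowels_with_ind_of_count, replace_vowels_with_ind_of_count_alt]
  have hA : s.toList.foldl (fun c ch => if ch ∈ pvVowels then c + 1 else c) (0 : Int)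
      = ((s.toList.filter (fun ch => ch ∈ pvVowels)).length : Int) := by
    rw [pv_count_eq]; ring
  have hB : ((((s.toList.foldl
        (fun (st : List (List Char) × List Char) ch =>
          if ch ∈ pvVowels then (st.1 ++ [st.2], ([] : List Char)) else (st.1, st.2 ++ [ch]))
        ([], [])).1 ++ [(s.toList.foldl
        (fun (st : List (List Char) × List Char) ch =>
          if ch ∈ pvVowels then (st.1 ++ [st.2], ([] : List Char)) else (st.1, st.2 ++ [ch]))
        ([], [])).2]).length : Int) - 1)
      = ((s.toList.filter (fun ch => ch ∈ pvVowels)).length : Int) := by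
    rw [List.length_append, pv_parts_len]
    simp
  rw [hA, hB]
  apply String.toList_inj.mp
  rw [pv_fold_A]
  simp only [String.toList_ofList]
  rw [pv_join_fold]
  simp [pvJoin]
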